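-- pv_equiv track=rewrite | github.com/miguelhg11/SKILLS-maestro-senior | scripts/skill-fixes/add_toc.py | find_insertion_point
-- ===== SOURCE A (Python) =====
-- def find_insertion_point(content: str) -> int:
--     """Find where to insert the TOC (after title + intro paragraph)."""
--     lines = content.split('\n')
--
--     # Find the first H1 or first content
--     h1_index = -1
--     for i, line in enumerate(lines):
--         if line.startswith('# ') and not line.startswith('##'):
--             h1_index = i
--             break
--
--     if h1_index == -1:
--         # No H1 found, insert at beginning
--         return 0
--
--     # Find end of intro paragraph (first blank line after H1)
--     # or first ## heading, whichever comes first
--     for i in range(h1_index + 1, len(lines)):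
--         line = lines[i].strip()
--
--         # Skip immediately following blank lines
--         if i == h1_index + 1 and not line:
--             continue
--
--         # Found start of intro paragraph, now find its end
--         if line:
--             # Look for end of paragraph (blank line) or next heading
--             for j in range(i, len(lines)):
--                 next_line = lines[j].strip()
--                 if not next_line:
--                     # Found blank line after intro
--                     return sum(len(l) + 1 for l in lines[:j+1])
--                 if next_line.startswith('## '):
--                     # Found next heading
--                     return sum(len(l) + 1 for l in lines[:j])
--
--     # Fallback: insert after H1
--     return sum(len(l) + 1 for l in lines[:h1_index + 2])
-- ===== SOURCE B (Python) =====
-- def find_insertion_point(content: str) -> int: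
--     """Find where to insert the TOC (after title + intro paragraph)."""
--     lines = content.split('\n')
--     n = len(lines)
--
--     # first H1 ('# ' cannot also start with '##', so that test suffices)
--     h1 = next((i for i, l in enumerate(lines) if l.startswith('# ')), None)
--     if h1 is None:
--         return 0
--
--     # prefix-offset table: offs[k] = byte offset of the start of line k
--     offs = [0]
--     for l in lines:
--         offs.append(offs[-1] + len(l) + 1)
--     off = lambda k: offs[min(k, n)]
--
--     # skip blank lines after the H1
--     j = h1 + 1
--     while j < n and not lines[j].strip():
--         j += 1
--     # single forward scan through the intro paragraph
--     while j < n: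
--         s = lines[j].strip()
--         if not s:
--             return off(j + 1)
--         if s.startswith('## '):
--             return off(j)
--         j += 1
--     return off(h1 + 2)
-- ===== Notes on version B (the rewrite author's own statement) =====
-- stated objective: simpler
-- what changed: Replaces A's nested rescanning loops and per-return O(n) prefix-sum recomputation with a prefix-offset table built once plus a single flat forward scan (skip blanks, then scan the intro paragraph), and a single-condition H1 search (the '##' test is redundant for lines starting with '# ').
import Mathlib
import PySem

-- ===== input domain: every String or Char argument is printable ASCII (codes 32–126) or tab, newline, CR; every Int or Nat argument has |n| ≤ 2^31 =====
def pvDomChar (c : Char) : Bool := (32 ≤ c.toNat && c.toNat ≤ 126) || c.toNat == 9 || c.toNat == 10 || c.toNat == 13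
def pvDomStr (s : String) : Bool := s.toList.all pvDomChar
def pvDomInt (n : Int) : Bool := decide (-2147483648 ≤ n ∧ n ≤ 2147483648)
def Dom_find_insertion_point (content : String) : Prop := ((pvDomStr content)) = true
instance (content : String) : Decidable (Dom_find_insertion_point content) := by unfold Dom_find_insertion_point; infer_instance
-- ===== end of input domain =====

-- B replaces A's nested rescanning loops and per-return prefix sums by a prefix-offset
-- table and one flat forward scan (objective: simpler).

-- ===== PORT A =====

-- sum(len(l) + 1 for l in lines[:k])
def pvA_off (lines : List (List Char)) (k : Nat) : Int :=
  ((lines.take k).map (fun l => (l.length : Int) + 1)).sum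

-- the 'for i, line in enumerate(lines): if line.startswith(...): h1_index = i; break' loop
def pvA_findH1 : Nat → List (List Char) → Int
  | _, [] => -1
  | i, l :: rest =>
      if PySem.Chars.startswith l ['#', ' '] && !(PySem.Chars.startswith l ['#', '#']) then (i : Int)
      else pvA_findH1 (i + 1) rest

-- the inner 'for j in range(i, len(lines))' loop (none = fell off the end)
def pvA_inner (lines : List (List Char)) : Nat → List (List Char) → Option Int
  | _, [] => none
  | j, l :: rest =>
      let s := PySem.Chars.strip l
      if s = [] then some (pvA_off lines (j + 1))
      else if PySem.Chars.startswith s ['#', '#', ' '] then some (pvA_off lines j)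
      else pvA_inner lines (j + 1) rest

-- the outer 'for i in range(h1_index + 1, len(lines))' loop
def pvA_outer (lines : List (List Char)) (h1 : Nat) : Nat → List (List Char) → Option Int
  | _, [] => none
  | i, l :: rest =>
      let s := PySem.Chars.strip l
      if i = h1 + 1 ∧ s = [] then pvA_outer lines h1 (i + 1) rest
      else if s ≠ [] then
        match pvA_inner lines i (l :: rest) with
        | some v => some v
        | none => pvA_outer lines h1 (i + 1) rest
      else pvA_outer lines h1 (i + 1) rest

def find_insertion_point (content : String) : Int :=
  let lines := PySem.Chars.splitOn content.toList ['\n']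
  let h1 := pvA_findH1 0 lines
  if h1 = -1 then 0
  else
    match pvA_outer lines h1.toNat (h1.toNat + 1) (lines.drop (h1.toNat + 1)) with
    | some v => v
    | none => pvA_off lines (h1.toNat + 2)

-- ===== PORT B =====

-- next((i for i, l in enumerate(lines) if l.startswith('# ')), None)
def pvB_findH1 : Nat → List (List Char) → Option Nat
  | _, [] => none
  | i, l :: rest =>
      if PySem.Chars.startswith l ['#', ' '] then some i else pvB_findH1 (i + 1) rest

-- the 'while j < n and not lines[j].strip(): j += 1' loop, over the suffix from j
def pvB_skip : Nat → List (List Char) → Nat × List (List Char)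
  | j, [] => (j, [])
  | j, l :: rest =>
      if PySem.Chars.strip l = [] then pvB_skip (j + 1) rest else (j, l :: rest)

-- the final 'while j < n' scan
def pvB_scan (off : Nat → Int) : Nat → List (List Char) → Option Int
  | _, [] => none
  | j, l :: rest =>
      let s := PySem.Chars.strip l
      if s = [] then some (off (j + 1))
      else if PySem.Chars.startswith s ['#', '#', ' '] then some (off j)
      else pvB_scan off (j + 1) rest

def find_insertion_point_alt (content : String) : Int :=
  let lines := PySem.Chars.splitOn content.toList ['\n']
  let n := lines.length
  match pvB_findH1 0 lines with
  | none => 0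
  | some h1 =>
      -- offs[k] = byte offset of the start of line k (offs[-1] accumulation loop)
      let offs : List Int :=
        lines.foldl (fun acc l => acc ++ [acc.getLastD 0 + (l.length : Int) + 1]) [0]
      let off : Nat → Int := fun k => offs.getD (min k n) 0
      let js := pvB_skip (h1 + 1) (lines.drop (h1 + 1))
      match pvB_scan off js.1 js.2 with
      | some v => v
      | none => off (h1 + 2)

-- ===== PRECONDITION & SPEC =====
def Spec_find_insertion_point (content : String) (out : Int) : Prop := out = find_insertion_point_alt content
instance (content : String) (out : Int) : Decidable (Spec_find_insertion_point content out) := by unfold Spec_find_insertion_point; infer_instance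

-- ===== CLAIM (what is proved, stated in full; the proofs are below) =====
def Claim_equal_find_insertion_point : Prop := ∀ (content : String), Dom_find_insertion_point content → Spec_find_insertion_point content (find_insertion_point content)

-- ===== LEMMAS AND PROOFS =====

-- the running-offset values produced by B's table-building fold
def pvScan : List (List Char) → Int → List Int
  | [], _ => []
  | l :: ls, c => (c + l.length + 1) :: pvScan ls (c + l.length + 1)

-- a line starting with '# ' cannot start with '##'
lemma pv_h1_cond (l : List Char) (h : PySem.Chars.startswith l ['#', ' '] = true) :
    PySem.Chars.startswith l ['#', '#'] = false := by
  by_contra hc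
  rw [Bool.not_eq_false, PySem.Chars.startswith_iff] at hc
  rw [PySem.Chars.startswith_iff] at h
  obtain ⟨t1, e1⟩ := h
  obtain ⟨t2, e2⟩ := hc
  rw [← e1] at e2
  simp at e2

lemma pv_findH1_rel (lines : List (List Char)) (i : Nat) :
    pvA_findH1 i lines = (pvB_findH1 i lines).elim (-1) (fun k => (k : Int)) := by
  induction lines generalizing i with
  | nil => simp [pvA_findH1, pvB_findH1]
  | cons l rest ih =>
      cases hb : PySem.Chars.startswith l ['#', ' '] with
      | false => simpa [pvA_findH1, pvB_findH1, hb] using ih (i + 1)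
      | true => simp [pvA_findH1, pvB_findH1, hb, pv_h1_cond l hb]

lemma pv_foldl_scan (lines : List (List Char)) :
    ∀ (acc : List Int) (c : Int),
    lines.foldl (fun acc l => acc ++ [acc.getLastD 0 + (l.length : Int) + 1]) (acc ++ [c])
      = (acc ++ [c]) ++ pvScan lines c := by
  induction lines with
  | nil => intro acc c; simp [pvScan]
  | cons l ls ih =>
      intro acc c
      have : (acc ++ [c]) ++ [c + l.length + 1]
          = (acc ++ [c]) ++ [(acc ++ [c]).getLastD 0 + (l.length : Int) + 1] := by
        rw [List.getLastD_concat]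
      calc (l :: ls).foldl (fun acc l => acc ++ [acc.getLastD 0 + (l.length : Int) + 1]) (acc ++ [c])
          = ls.foldl (fun acc l => acc ++ [acc.getLastD 0 + (l.length : Int) + 1])
              ((acc ++ [c]) ++ [c + l.length + 1]) := by rw [this]; rfl
        _ = ((acc ++ [c]) ++ [c + l.length + 1]) ++ pvScan ls (c + l.length + 1) :=
              ih (acc ++ [c]) (c + l.length + 1)
        _ = (acc ++ [c]) ++ pvScan (l :: ls) c := by simp [pvScan]

lemma pv_scan_map (lines : List (List Char)) :
    ∀ (c : Int), c :: pvScan lines c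
      = (List.range (lines.length + 1)).map (fun k => c + pvA_off lines k) := by
  induction lines with
  | nil => intro c; simp [pvScan, pvA_off]
  | cons l ls ih =>
      intro c
      rw [List.range_succ_eq_map, List.map_cons, List.map_map]
      have h0 : c + pvA_off (l :: ls) 0 = c := by simp [pvA_off]
      have hcomp : ((fun k => c + pvA_off (l :: ls) k) ∘ Nat.succ)
          = fun k => (c + (l.length : Int) + 1) + pvA_off ls k := by
        funext k
        simp only [Function.comp, pvA_off, List.take_succ_cons, List.map_cons, List.sum_cons]
        ring
      rw [h0, hcomp, List.length_cons, ← ih (c + l.length + 1)]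
      simp [pvScan]

lemma pv_offs_eq (lines : List (List Char)) :
    lines.foldl (fun acc l => acc ++ [acc.getLastD 0 + (l.length : Int) + 1]) [0]
      = (List.range (lines.length + 1)).map (fun k => pvA_off lines k) := by
  have h := pv_foldl_scan lines [] 0
  simp only [List.nil_append] at h
  rw [h]
  have h2 := pv_scan_map lines 0
  simp only [zero_add] at h2
  simpa using h2

lemma pv_off_clamp (lines : List (List Char)) (k : Nat) :
    pvA_off lines (min k lines.length) = pvA_off lines k := by
  by_cases hk : k ≤ lines.length
  · rw [Nat.min_eq_left hk]
  · rw [Nat.min_eq_right (Nat.le_of_lt (Nat.lt_of_not_le hk))]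
    unfold pvA_off
    rw [List.take_of_length_le (le_refl _), List.take_of_length_le (Nat.le_of_lt (Nat.lt_of_not_le hk))]

lemma pv_off_fun_eq (lines : List (List Char)) :
    (fun k => ((List.range (lines.length + 1)).map (fun k => pvA_off lines k)).getD
        (min k lines.length) 0) = pvA_off lines := by
  funext k
  have hlt : min k lines.length < lines.length + 1 := by omega
  rw [List.getD_eq_getElem?_getD, List.getElem?_map, List.getElem?_range hlt]
  simp [pv_off_clamp]

lemma pv_scan_eq_inner (lines : List (List Char)) (L : List (List Char)) (j : Nat) :
    pvB_scan (pvA_off lines) j L = pvA_inner lines j L := by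
  induction L generalizing j with
  | nil => rfl
  | cons l rest ih => simp only [pvB_scan, pvA_inner, ih]

lemma pv_inner_none_outer (lines : List (List Char)) (L : List (List Char)) :
    ∀ (i h1 : Nat), pvA_inner lines i L = none → pvA_outer lines h1 i L = none := by
  induction L with
  | nil => intro i h1 _; rfl
  | cons l rest ih =>
      intro i h1 h
      simp only [pvA_inner] at h
      by_cases hs : PySem.Chars.strip l = []
      · simp [hs] at h
      · by_cases hh : PySem.Chars.startswith (PySem.Chars.strip l) ['#', '#', ' '] = true
        · simp [hs, hh] at h
        · have h' : pvA_inner lines (i + 1) rest = none := by simpa [hs, hh] using h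
          simp [pvA_outer, hs, pvA_inner, hh, h', ih (i + 1) h1 h']

lemma pv_outer_eq_skip (lines : List (List Char)) (L : List (List Char)) :
    ∀ (i h1 : Nat), pvA_outer lines h1 i L
      = pvA_inner lines (pvB_skip i L).1 (pvB_skip i L).2 := by
  induction L with
  | nil => intro i h1; rfl
  | cons l rest ih =>
      intro i h1
      by_cases hs : PySem.Chars.strip l = []
      · have hrec := ih (i + 1) h1
        simp only [pvA_outer, pvB_skip, hs, if_true]
        split_ifs with h1c h2c
        · exact hrec
        · exact absurd rfl h2c
        · exact hrec
      · simp only [pvA_outer, pvB_skip, hs, if_false]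
        split_ifs with h1c
        · exact h1c.2.elim
        · cases hinner : pvA_inner lines i (l :: rest) with
          | some v => rfl
          | none =>
              have hout := pv_inner_none_outer lines rest (i + 1) h1 (by
                simp only [pvA_inner] at hinner
                by_cases hh : PySem.Chars.startswith (PySem.Chars.strip l) ['#', '#', ' '] = true
                · simp [hs, hh] at hinner
                · simpa [hs, hh] using hinner)
              exact hout

lemma pv_off_point (lines : List (List Char)) (k : Nat) :
    ((List.range (lines.length + 1)).map (fun k => pvA_off lines k)).getD
        (min k lines.length) 0 = pvA_off lines k := by
  have hlt : min k lines.length < lines.length + 1 := by omega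
  rw [List.getD_eq_getElem?_getD, List.getElem?_map, List.getElem?_range hlt]
  simp [pv_off_clamp]

-- ===== VERDICT (by name: the statement is the Claim_ definition above) =====
theorem find_insertion_point_spec : Claim_equal_find_insertion_point := by
  intro content _
  unfold Spec_find_insertion_point find_insertion_point find_insertion_point_alt
  simp only []
  set lines := PySem.Chars.splitOn content.toList ['\n'] with hlines
  rw [pv_findH1_rel lines 0, pv_offs_eq lines, pv_off_fun_eq lines]
  cases hb : pvB_findH1 0 lines with
  | none => simp
  | some k =>
      simp only [Option.elim, Int.toNat_natCast]
      have hne : (k : Int) = -1 → False := by omega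
      rw [if_neg hne]
      rw [pv_outer_eq_skip lines (lines.drop (k + 1)) (k + 1) k]
      rw [pv_scan_eq_inner lines]
      simp only [pv_off_point]
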